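-- pv_equiv track=rewrite | github.com/JohnB-Dunsmuir/PO_Processing | Parsers/parser_boario_impianti.py | detect_boario_impianti
-- ===== SOURCE A (Python) =====
-- def detect_boario_impianti(text: str) -> bool:
--     if not text:
--         return False
--     t = text.lower()
--     triggers = [
--         "boario impianti s.r.l",
--         "boario impianti srl",
--         "ordine di acquisto",
--         "bossico (bg)",
--     ]
--     return any(trig in t for trig in triggers)
-- ===== SOURCE B (Python) =====
-- _TRIGGERS = (
--     "boario impianti s.r.l",
--     "boario impianti srl",
--     "ordine di acquisto",
--     "bossico (bg)",
-- )
--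
--
-- def detect_boario_impianti(text: str) -> bool:
--     # Single left-to-right scan: at each position test whether some trigger starts there.
--     t = text.lower()
--     for i in range(len(t)):
--         if any(t.startswith(trig, i) for trig in _TRIGGERS):
--             return True
--     return False
-- ===== Notes on version B (the rewrite author's own statement) =====
-- stated objective: alternative
-- what changed: Replaces four independent substring-containment scans (one per trigger) by one position-major left-to-right scan of the lowered text that tests at each position whether any trigger starts there, with no separate empty-text guard.
import Mathlib
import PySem

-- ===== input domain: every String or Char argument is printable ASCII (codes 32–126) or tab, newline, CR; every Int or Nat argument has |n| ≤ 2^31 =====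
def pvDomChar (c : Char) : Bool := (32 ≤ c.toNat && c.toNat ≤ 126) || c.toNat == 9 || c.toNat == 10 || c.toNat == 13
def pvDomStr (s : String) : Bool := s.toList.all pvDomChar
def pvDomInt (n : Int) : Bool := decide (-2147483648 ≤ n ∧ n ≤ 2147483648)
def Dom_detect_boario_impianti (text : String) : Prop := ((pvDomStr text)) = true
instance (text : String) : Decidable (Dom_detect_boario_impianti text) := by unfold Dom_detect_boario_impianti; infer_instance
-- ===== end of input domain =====

-- B replaces A's four separate substring-containment scans by one position-major
-- left-to-right scan that tests at each position whether any trigger starts there (alternative, same cost).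

-- ===== PORT A =====
def detect_boario_impianti (text : String) : Bool :=
  if text.toList = [] then false
  else
    let t := PySem.Str.lower text
    (["boario impianti s.r.l", "boario impianti srl", "ordine di acquisto",
      "bossico (bg)"] : List String).any (fun trig => PySem.Str.isIn trig t)

-- ===== PORT B =====
def pvTriggersB : List (List Char) :=
  ["boario impianti s.r.l".toList, "boario impianti srl".toList,
   "ordine di acquisto".toList, "bossico (bg)".toList]

-- the scan loop of Source B: for each position (suffix), does some trigger start here?
def pvScan : List Char → Bool
  | [] => false
  | c :: rest =>
      if pvTriggersB.any (fun trig => trig.isPrefixOf (c :: rest)) then true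
      else pvScan rest

def detect_boario_impianti_alt (text : String) : Bool :=
  pvScan (PySem.Chars.lower text.toList)

-- ===== PRECONDITION & SPEC =====
def Spec_detect_boario_impianti (text : String) (out : Bool) : Prop := out = detect_boario_impianti_alt text
instance (text : String) (out : Bool) : Decidable (Spec_detect_boario_impianti text out) := by unfold Spec_detect_boario_impianti; infer_instance

-- ===== CLAIM (what is proved, stated in full; the proofs are below) =====
def Claim_equal_detect_boario_impianti : Prop := ∀ (text : String), Dom_detect_boario_impianti text → Spec_detect_boario_impianti text (detect_boario_impianti text)

-- ===== LEMMAS AND PROOFS =====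

lemma pvScan_eq_any_infix : ∀ cs : List Char,
    pvScan cs = pvTriggersB.any (fun trig => decide (trig <:+: cs)) := by
  intro cs
  induction cs with
  | nil => simp [pvScan, pvTriggersB]
  | cons c rest ih =>
      rw [pvScan, ih]
      cases h : pvTriggersB.any (fun trig => trig.isPrefixOf (c :: rest)) with
      | true =>
          simp only [if_true]
          rcases List.any_eq_true.mp h with ⟨trig, hmem, hpre⟩
          symm
          refine List.any_eq_true.mpr ⟨trig, hmem, ?_⟩
          simp [List.infix_cons_iff, List.isPrefixOf_iff_prefix.mp hpre]
      | false =>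
          simp only [Bool.false_eq_true, if_false]
          rw [List.any_eq_false] at h
          rw [Bool.eq_iff_iff]
          simp only [List.any_eq_true, decide_eq_true_eq]
          constructor
          · rintro ⟨trig, hmem, hin⟩
            exact ⟨trig, hmem, List.infix_cons_iff.mpr (Or.inr hin)⟩
          · rintro ⟨trig, hmem, hin⟩
            rcases List.infix_cons_iff.mp hin with hp | hi
            · exact absurd (List.isPrefixOf_iff_prefix.mpr hp) (by simpa using h trig hmem)
            · exact ⟨trig, hmem, hi⟩

lemma pvIsIn_eq_decide (sub s : String) :
    PySem.Str.isIn sub s = decide (sub.toList <:+: s.toList) := by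
  rw [Bool.eq_iff_iff]
  simp only [PySem.Str.isIn_iff_infix, decide_eq_true_eq]

-- ===== VERDICT (by name: the statement is the Claim_ definition above) =====
theorem detect_boario_impianti_spec : Claim_equal_detect_boario_impianti := by
  intro text _
  unfold Spec_detect_boario_impianti detect_boario_impianti detect_boario_impianti_alt
  rw [pvScan_eq_any_infix]
  by_cases h : text.toList = []
  · rw [if_pos h, h]
    decide
  · rw [if_neg h]
    simp only [pvTriggersB, List.any_cons, List.any_nil, pvIsIn_eq_decide,
      PySem.Str.toList_lower]
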